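-- pv_equiv track=rewrite | github.com/ppytel-agh/JBLS-graph-labs | test_utilities.py | incidence_matrix_contains_edge
-- ===== SOURCE A (Python) =====
-- def incidence_matrix_contains_edge(incidence_matrix, edge_nodes):
--     number_of_edges = len(incidence_matrix[0])
--     number_of_nodes = len(incidence_matrix)
--
--     for edge_index in range(number_of_edges):
--         nodes_found = 0
--         for node_index in range(number_of_nodes):
--             if incidence_matrix[node_index][edge_index] == 1:
--                 if node_index == edge_nodes[0] or node_index == edge_nodes[1]:
--                     nodes_found += 1
--                     if nodes_found == 2:
--                         return True
--
--     return False
-- ===== SOURCE B (Python) =====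
-- def incidence_matrix_contains_edge(incidence_matrix, edge_nodes):
--     a, b = edge_nodes[0], edge_nodes[1]
--     number_of_edges = len(incidence_matrix[0])
--     number_of_nodes = len(incidence_matrix)
--     if a == b or not (0 <= a < number_of_nodes and 0 <= b < number_of_nodes):
--         return False
--     row_a = incidence_matrix[a]
--     row_b = incidence_matrix[b]
--     return any(row_a[j] == 1 and row_b[j] == 1 for j in range(number_of_edges))
-- ===== Notes on version B (the rewrite author's own statement) =====
-- stated objective: faster
-- what changed: Instead of scanning every row of every column with a match counter and early exit, B validates the two endpoint indices once, picks the two endpoint rows directly, and does a single scan for a column where both rows carry a 1.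
-- outside the precondition, e.g. on incidence_matrix_contains_edge([[0]], []): A returns False, B raises IndexError; on incidence_matrix_contains_edge([[1], [1], []], [0, 1]): A returns True, B returns True
import Mathlib
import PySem

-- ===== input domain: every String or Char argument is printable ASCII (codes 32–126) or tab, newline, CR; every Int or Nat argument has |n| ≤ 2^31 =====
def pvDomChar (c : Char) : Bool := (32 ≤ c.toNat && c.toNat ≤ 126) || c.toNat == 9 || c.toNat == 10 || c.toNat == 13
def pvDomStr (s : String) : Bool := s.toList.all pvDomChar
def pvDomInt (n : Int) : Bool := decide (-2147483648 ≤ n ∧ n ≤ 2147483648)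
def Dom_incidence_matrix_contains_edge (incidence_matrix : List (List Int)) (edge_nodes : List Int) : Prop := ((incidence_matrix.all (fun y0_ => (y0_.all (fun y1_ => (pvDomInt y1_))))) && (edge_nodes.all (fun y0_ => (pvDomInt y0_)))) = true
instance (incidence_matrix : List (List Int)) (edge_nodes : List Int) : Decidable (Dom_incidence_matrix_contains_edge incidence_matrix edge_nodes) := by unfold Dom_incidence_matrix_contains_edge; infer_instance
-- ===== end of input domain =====

-- B replaces A's count-matching-rows-per-column scan by a direct two-row common-column scan (asymptotically fewer cell reads).

-- ===== PORT A =====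
def pvA_nodeLoop (incidence_matrix : List (List Int)) (edge_nodes : List Int)
    (edge_index : Int) (nodes : List Int) (nodes_found : Int) : Bool :=
  match nodes with
  | [] => false
  | node_index :: rest =>
    if (PySem.List.pyGetD (PySem.List.pyGetD incidence_matrix node_index []) edge_index 0) == 1 then
      if node_index == PySem.List.pyGetD edge_nodes 0 0 || node_index == PySem.List.pyGetD edge_nodes 1 0 then
        if nodes_found + 1 == 2 then true
        else pvA_nodeLoop incidence_matrix edge_nodes edge_index rest (nodes_found + 1)
      else pvA_nodeLoop incidence_matrix edge_nodes edge_index rest nodes_found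
    else pvA_nodeLoop incidence_matrix edge_nodes edge_index rest nodes_found

def incidence_matrix_contains_edge (incidence_matrix : List (List Int)) (edge_nodes : List Int) : Bool :=
  let number_of_edges : Int := ((PySem.List.pyGetD incidence_matrix 0 []).length : Int)
  let number_of_nodes : Int := (incidence_matrix.length : Int)
  (PySem.List.pyRange 0 number_of_edges 1).any (fun edge_index =>
    pvA_nodeLoop incidence_matrix edge_nodes edge_index
      (PySem.List.pyRange 0 number_of_nodes 1) 0)

-- ===== PORT B =====
def incidence_matrix_contains_edge_alt (incidence_matrix : List (List Int)) (edge_nodes : List Int) : Bool :=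
  let a := PySem.List.pyGetD edge_nodes 0 0
  let b := PySem.List.pyGetD edge_nodes 1 0
  let number_of_edges : Int := ((PySem.List.pyGetD incidence_matrix 0 []).length : Int)
  let number_of_nodes : Int := (incidence_matrix.length : Int)
  if a = b ∨ ¬ (0 ≤ a ∧ a < number_of_nodes ∧ 0 ≤ b ∧ b < number_of_nodes) then false
  else
    let row_a := PySem.List.pyGetD incidence_matrix a []
    let row_b := PySem.List.pyGetD incidence_matrix b []
    (PySem.List.pyRange 0 number_of_edges 1).any (fun j =>
      PySem.List.pyGetD row_a j 0 == 1 && PySem.List.pyGetD row_b j 0 == 1)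

-- ===== PRECONDITION & SPEC =====
-- Pre_ excludes inputs where Python A raises IndexError: an empty matrix, rows shorter than the
-- first row (A reads matrix[i][j] for j < len(matrix[0])), and edge-node lists shorter than 2
-- (A reads edge_nodes[0]/edge_nodes[1] as soon as any cell is 1; when no cell is 1 it returns
-- False only by accidental laziness, and the raggedness clause can likewise exclude runs where
-- an early True precedes the out-of-range read — both defensible accidents, see cites).
def Pre_incidence_matrix_contains_edge (incidence_matrix : List (List Int)) (edge_nodes : List Int) : Prop :=
  incidence_matrix ≠ [] ∧
  (∀ r ∈ incidence_matrix, (incidence_matrix.headD []).length ≤ r.length) ∧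
  2 ≤ edge_nodes.length
instance (incidence_matrix : List (List Int)) (edge_nodes : List Int) : Decidable (Pre_incidence_matrix_contains_edge incidence_matrix edge_nodes) := by unfold Pre_incidence_matrix_contains_edge; infer_instance

def pvWitness_incidence_matrix_contains_edge : List (List Int) × List Int :=
  ([[1, 0], [1, 1], [0, 1]], [0, 1])

def Spec_incidence_matrix_contains_edge (incidence_matrix : List (List Int)) (edge_nodes : List Int) (out : Bool) : Prop := out = incidence_matrix_contains_edge_alt incidence_matrix edge_nodes
instance (incidence_matrix : List (List Int)) (edge_nodes : List Int) (out : Bool) : Decidable (Spec_incidence_matrix_contains_edge incidence_matrix edge_nodes out) := by unfold Spec_incidence_matrix_contains_edge; infer_instance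

-- ===== CLAIM (what is proved, stated in full; the proofs are below) =====
def Claim_equal_incidence_matrix_contains_edge : Prop := ∀ (incidence_matrix : List (List Int)) (edge_nodes : List Int), Dom_incidence_matrix_contains_edge incidence_matrix edge_nodes → Pre_incidence_matrix_contains_edge incidence_matrix edge_nodes → Spec_incidence_matrix_contains_edge incidence_matrix edge_nodes (incidence_matrix_contains_edge incidence_matrix edge_nodes)

-- ===== LEMMAS AND PROOFS =====

-- A's inner loop returns true iff the running counter plus the number of remaining matching rows reaches 2.
lemma pvA_nodeLoop_iff (m : List (List Int)) (en : List Int) (j : Int) :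
    ∀ (nodes : List Int) (found : Int), found = 0 ∨ found = 1 →
      (pvA_nodeLoop m en j nodes found = true ↔
        2 ≤ found + (nodes.countP (fun i =>
          (PySem.List.pyGetD (PySem.List.pyGetD m i []) j 0 == 1) &&
          (i == PySem.List.pyGetD en 0 0 || i == PySem.List.pyGetD en 1 0)) : Int)) := by
  intro nodes
  induction nodes with
  | nil => intro found h; simp [pvA_nodeLoop]; omega
  | cons i rest ih =>
    intro found h
    by_cases h1 : (PySem.List.pyGetD (PySem.List.pyGetD m i []) j 0 == 1) = true
    · by_cases h2 : (i == PySem.List.pyGetD en 0 0 || i == PySem.List.pyGetD en 1 0) = true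
      · rcases h with h | h
        · subst h
          simp only [pvA_nodeLoop, h1, h2, if_true, List.countP_cons, Bool.and_self]
          have := ih 1 (Or.inr rfl)
          norm_num
          rw [this]
          omega
        · subst h
          simp only [pvA_nodeLoop, h1, h2, if_true, List.countP_cons, Bool.and_self]
          norm_num
          omega
      · simp only [pvA_nodeLoop, h1, if_true, List.countP_cons]
        rw [if_neg h2, ih found h]
        simp [h2]
    · simp only [pvA_nodeLoop, List.countP_cons]
      rw [if_neg h1, ih found h]
      simp [h1]

lemma pvLen_le_one {l : List Int} (hl : l.Nodup) (x : Int) (h : ∀ y ∈ l, y = x) :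
    l.length ≤ 1 := by
  match l with
  | [] => simp
  | [y] => simp
  | y1 :: y2 :: rest =>
    exfalso
    have h1 := h y1 (by simp)
    have h2 := h y2 (by simp)
    simp [h1.trans h2.symm] at hl

-- counting, over a duplicate-free list, the elements that satisfy q and equal a or b
lemma pvCount_two_iff {l : List Int} (hl : l.Nodup) (a b : Int) (q : Int → Bool) :
    (2 ≤ (l.countP (fun i => q i && (i == a || i == b)) : Int)) ↔
      (a ≠ b ∧ (a ∈ l ∧ q a = true) ∧ (b ∈ l ∧ q b = true)) := by
  set p : Int → Bool := fun i => q i && (i == a || i == b) with hp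
  have hfl : l.countP p = (l.filter p).length := List.countP_eq_length_filter
  have hfn : (l.filter p).Nodup := hl.filter p
  have hmem : ∀ y ∈ l.filter p, y ∈ l ∧ q y = true ∧ (y = a ∨ y = b) := by
    intro y hy
    rw [List.mem_filter] at hy
    refine ⟨hy.1, ?_, ?_⟩ <;> simp [hp] at hy <;> tauto
  constructor
  · intro h2
    have hlen : 2 ≤ (l.filter p).length := by omega
    have hab : a ≠ b := by
      intro heq
      have := pvLen_le_one hfn a (fun y hy => by rcases (hmem y hy).2.2 with h | h <;> omega)
      omega
    refine ⟨hab, ?_, ?_⟩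
    · by_contra hna
      have hall : ∀ y ∈ l.filter p, y = b := by
        intro y hy
        rcases hmem y hy with ⟨hyl, hyq, h | h⟩
        · exact absurd ⟨h ▸ hyl, h ▸ hyq⟩ hna
        · exact h
      have := pvLen_le_one hfn b hall
      omega
    · by_contra hnb
      have hall : ∀ y ∈ l.filter p, y = a := by
        intro y hy
        rcases hmem y hy with ⟨hyl, hyq, h | h⟩
        · exact h
        · exact absurd ⟨h ▸ hyl, h ▸ hyq⟩ hnb
      have := pvLen_le_one hfn a hall
      omega
  · rintro ⟨hab, ⟨hal, haq⟩, ⟨hbl, hbq⟩⟩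
    obtain ⟨l1, l2, rfl⟩ := List.append_of_mem hal
    have hpa : p a = true := by simp [hp, haq]
    have hpb : p b = true := by simp [hp, hbq]
    have hb2 : b ∈ l1 ∨ b ∈ l2 := by
      rcases List.mem_append.mp hbl with h | h
      · exact Or.inl h
      · rcases List.mem_cons.mp h with h | h
        · exact absurd h.symm hab
        · exact Or.inr h
    rcases hb2 with h | h
    · have hpos : 0 < l1.countP p := List.countP_pos_iff.mpr ⟨b, h, hpb⟩
      simp only [List.countP_append, List.countP_cons, hpa, if_true]
      push_cast
      omega
    · have hpos : 0 < l2.countP p := List.countP_pos_iff.mpr ⟨b, h, hpb⟩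
      simp only [List.countP_append, List.countP_cons, hpa, if_true]
      push_cast
      omega

-- per-column characterisation of A's inner loop started at 0
lemma pvA_col_iff (m : List (List Int)) (en : List Int) (j : Int) :
    pvA_nodeLoop m en j (PySem.List.pyRange 0 (m.length : Int) 1) 0 = true ↔
      (PySem.List.pyGetD en 0 0 ≠ PySem.List.pyGetD en 1 0 ∧
       ((0 ≤ PySem.List.pyGetD en 0 0 ∧ PySem.List.pyGetD en 0 0 < (m.length : Int)) ∧
        (PySem.List.pyGetD (PySem.List.pyGetD m (PySem.List.pyGetD en 0 0) []) j 0 == 1) = true) ∧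
       ((0 ≤ PySem.List.pyGetD en 1 0 ∧ PySem.List.pyGetD en 1 0 < (m.length : Int)) ∧
        (PySem.List.pyGetD (PySem.List.pyGetD m (PySem.List.pyGetD en 1 0) []) j 0 == 1) = true)) := by
  rw [pvA_nodeLoop_iff m en j _ 0 (Or.inl rfl), zero_add,
    pvCount_two_iff (PySem.List.nodup_pyRange_one 0 (m.length : Int))
      (PySem.List.pyGetD en 0 0) (PySem.List.pyGetD en 1 0)
      (fun i => PySem.List.pyGetD (PySem.List.pyGetD m i []) j 0 == 1)]
  simp [PySem.List.mem_pyRange_one]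

-- ===== VERDICT (by name: the statement is the Claim_ definition above) =====
theorem incidence_matrix_contains_edge_spec : Claim_equal_incidence_matrix_contains_edge := by
  intro m en _ _
  unfold Spec_incidence_matrix_contains_edge
  unfold incidence_matrix_contains_edge incidence_matrix_contains_edge_alt
  simp only
  by_cases hok : PySem.List.pyGetD en 0 0 = PySem.List.pyGetD en 1 0 ∨
      ¬ (0 ≤ PySem.List.pyGetD en 0 0 ∧ PySem.List.pyGetD en 0 0 < (m.length : Int) ∧
         0 ≤ PySem.List.pyGetD en 1 0 ∧ PySem.List.pyGetD en 1 0 < (m.length : Int))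
  · rw [if_pos hok, List.any_eq_false]
    intro j _
    rw [Bool.not_eq_true] at *
    rw [← Bool.not_eq_true, pvA_col_iff m en j]
    tauto
  · rw [if_neg hok]
    push_neg at hok
    rw [Bool.eq_iff_iff, List.any_eq_true, List.any_eq_true]
    constructor
    · rintro ⟨j, hj, hloop⟩
      rw [pvA_col_iff m en j] at hloop
      refine ⟨j, hj, ?_⟩
      simp only [Bool.and_eq_true]
      exact ⟨hloop.2.1.2, hloop.2.2.2⟩
    · rintro ⟨j, hj, hcells⟩
      simp only [Bool.and_eq_true] at hcells
      refine ⟨j, hj, ?_⟩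
      rw [pvA_col_iff m en j]
      tauto
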